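-- pv_equiv track=rewrite | github.com/sk-ruban/adventofcode | 2023/day02 - cube conundrum/day02.py | check_possible_game
-- ===== SOURCE A (Python) =====
-- def check_possible_game(game_id, content):
--     for subset in content.split(";"):
--         storage = [0, 0, 0]  # rgb
--         for cubes in subset.split(","):
--             num, colour = cubes.split()
--             match colour:
--                 case "red": storage[0] += int(num)
--                 case "green": storage[1] += int(num)
--                 case "blue": storage[2] += int(num)
--         if check_lists(storage, max_cubes) is False:
--             return 0
--
--     return game_id
--
-- def check_lists(list1, list2):
--     if len(list1) != len(list2):
--         return False
--     for num1, num2 in zip(list1, list2):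
--         if num1 > num2:
--             return False
--     return True
--
-- max_cubes = [12, 13, 14]
-- ===== SOURCE B (Python) =====
-- def check_possible_game(game_id, content):
--     max_r = max_g = max_b = 0
--     for subset in content.split(";"):
--         r = g = b = 0
--         for cubes in subset.split(","):
--             num, colour = cubes.split()
--             if colour == "red":
--                 r += int(num)
--             elif colour == "green":
--                 g += int(num)
--             elif colour == "blue":
--                 b += int(num)
--         max_r = max(max_r, r)
--         max_g = max(max_g, g)
--         max_b = max(max_b, b)
--     return game_id if max_r <= 12 and max_g <= 13 and max_b <= 14 else 0
-- ===== Notes on version B (the rewrite author's own statement) =====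
-- stated objective: alternative
-- what changed: Instead of an early-exit per-subset list comparison through a check_lists helper, B maintains three running cross-subset maxima and performs a single threshold check at the end.
-- outside the precondition, e.g. on check_possible_game(1, '99 red; x'): A returns 0, B raises ValueError
import Mathlib
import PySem

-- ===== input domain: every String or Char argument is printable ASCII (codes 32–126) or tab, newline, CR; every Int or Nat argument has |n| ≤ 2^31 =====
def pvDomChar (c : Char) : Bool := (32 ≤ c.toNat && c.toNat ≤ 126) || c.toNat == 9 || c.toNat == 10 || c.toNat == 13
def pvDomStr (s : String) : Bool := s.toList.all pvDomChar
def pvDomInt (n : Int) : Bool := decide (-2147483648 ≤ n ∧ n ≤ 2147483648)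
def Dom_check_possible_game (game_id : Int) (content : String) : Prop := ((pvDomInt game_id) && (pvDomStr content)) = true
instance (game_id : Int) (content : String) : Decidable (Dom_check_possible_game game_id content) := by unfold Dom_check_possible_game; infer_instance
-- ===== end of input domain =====

-- ===== PORT A =====
-- B changes the decomposition only: running maxima + one final check instead of A's per-subset early-exit compare; same parsing, same cost.
-- s.split(sep) for the non-empty literal separators ";" and "," (split? is none only for sep = "")
def pySplit (s sep : String) : List String := (PySem.Str.split? s sep).getD []

-- Python raises (ValueError) on cube tokens that do not split into exactly two fields; the port
-- leaves storage unchanged there, and Pre_ excludes those inputs.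
def aCube (storage : List Int) (cubes : String) : List Int :=
  if (PySem.Str.split₀ cubes).length = 2 then
    if (PySem.Str.split₀ cubes).getD 1 "" = "red" then
      storage.set 0 (storage.getD 0 0 + (PySem.Int.ofStr? ((PySem.Str.split₀ cubes).getD 0 "")).getD 0)
    else if (PySem.Str.split₀ cubes).getD 1 "" = "green" then
      storage.set 1 (storage.getD 1 0 + (PySem.Int.ofStr? ((PySem.Str.split₀ cubes).getD 0 "")).getD 0)
    else if (PySem.Str.split₀ cubes).getD 1 "" = "blue" then
      storage.set 2 (storage.getD 2 0 + (PySem.Int.ofStr? ((PySem.Str.split₀ cubes).getD 0 "")).getD 0)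
    else storage
  else storage

def max_cubes : List Int := [12, 13, 14]

def check_lists_loop : List (Int × Int) → Bool
  | [] => true
  | (num1, num2) :: rest => if num1 > num2 then false else check_lists_loop rest

def check_lists (list1 list2 : List Int) : Bool :=
  if list1.length ≠ list2.length then false
  else check_lists_loop (list1.zip list2)

def aLoop (game_id : Int) : List String → Int
  | [] => game_id
  | subset :: rest =>
      let storage := (pySplit subset ",").foldl aCube [0, 0, 0]
      if check_lists storage max_cubes = false then 0 else aLoop game_id rest

def check_possible_game (game_id : Int) (content : String) : Int :=
  aLoop game_id (pySplit content ";")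

-- ===== PORT B =====
-- same raising tokens as A: the port skips them, Pre_ excludes those inputs
def bCube (acc : Int × Int × Int) (cubes : String) : Int × Int × Int :=
  if (PySem.Str.split₀ cubes).length = 2 then
    if (PySem.Str.split₀ cubes).getD 1 "" = "red" then
      (acc.1 + (PySem.Int.ofStr? ((PySem.Str.split₀ cubes).getD 0 "")).getD 0, acc.2.1, acc.2.2)
    else if (PySem.Str.split₀ cubes).getD 1 "" = "green" then
      (acc.1, acc.2.1 + (PySem.Int.ofStr? ((PySem.Str.split₀ cubes).getD 0 "")).getD 0, acc.2.2)
    else if (PySem.Str.split₀ cubes).getD 1 "" = "blue" then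
      (acc.1, acc.2.1, acc.2.2 + (PySem.Int.ofStr? ((PySem.Str.split₀ cubes).getD 0 "")).getD 0)
    else acc
  else acc

def bSubset (m : Int × Int × Int) (subset : String) : Int × Int × Int :=
  let c := (pySplit subset ",").foldl bCube (0, 0, 0)
  (max m.1 c.1, max m.2.1 c.2.1, max m.2.2 c.2.2)

def check_possible_game_alt (game_id : Int) (content : String) : Int :=
  let m := (pySplit content ";").foldl bSubset (0, 0, 0)
  if m.1 ≤ 12 ∧ m.2.1 ≤ 13 ∧ m.2.2 ≤ 14 then game_id else 0

-- ===== PRECONDITION & SPEC =====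
-- Pre_ excludes contents with a malformed cube token (not exactly two whitespace-separated
-- fields, or an rgb colour whose count is not an int literal): Python A raises ValueError on
-- those unless an earlier over-limit subset makes it return 0 first; B scans all subsets and raises there.
def Pre_check_possible_game (game_id : Int) (content : String) : Prop :=
  ∀ subset ∈ pySplit content ";", ∀ cubes ∈ pySplit subset ",",
    (PySem.Str.split₀ cubes).length = 2 ∧
    ((PySem.Str.split₀ cubes).getD 1 "" ∈ ["red", "green", "blue"] →
      (PySem.Int.ofStr? ((PySem.Str.split₀ cubes).getD 0 "")).isSome = true)
instance (game_id : Int) (content : String) : Decidable (Pre_check_possible_game game_id content) := by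
  unfold Pre_check_possible_game; infer_instance

def pvWitness_check_possible_game : Int × String := (1, "3 red, 4 blue; 2 green")

def Spec_check_possible_game (game_id : Int) (content : String) (out : Int) : Prop := out = check_possible_game_alt game_id content
instance (game_id : Int) (content : String) (out : Int) : Decidable (Spec_check_possible_game game_id content out) := by unfold Spec_check_possible_game; infer_instance

-- ===== CLAIM (what is proved, stated in full; the proofs are below) =====
def Claim_equal_check_possible_game : Prop := ∀ (game_id : Int) (content : String), Dom_check_possible_game game_id content → Pre_check_possible_game game_id content → Spec_check_possible_game game_id content (check_possible_game game_id content)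

-- ===== LEMMAS AND PROOFS =====
def tl3 (t : Int × Int × Int) : List Int := [t.1, t.2.1, t.2.2]

theorem aCube_eq (t : Int × Int × Int) (cubes : String) :
    aCube (tl3 t) cubes = tl3 (bCube t cubes) := by
  obtain ⟨a, b, c⟩ := t
  simp only [aCube, bCube, tl3]
  split_ifs <;> rfl

theorem foldl_cube_eq (tokens : List String) (t : Int × Int × Int) :
    tokens.foldl aCube (tl3 t) = tl3 (tokens.foldl bCube t) := by
  induction tokens generalizing t with
  | nil => rfl
  | cons x xs ih => simp only [List.foldl_cons, aCube_eq]; exact ih _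

theorem check_lists_iff (x y z : Int) :
    check_lists [x, y, z] max_cubes = false ↔ ¬ (x ≤ 12 ∧ y ≤ 13 ∧ z ≤ 14) := by
  simp only [check_lists, check_lists_loop, max_cubes, List.zip, List.zipWith, List.length]
  split_ifs <;> simp_all

theorem bSubset_mono (ss : List String) (t : Int × Int × Int) :
    t.1 ≤ (ss.foldl bSubset t).1 ∧ t.2.1 ≤ (ss.foldl bSubset t).2.1 ∧
      t.2.2 ≤ (ss.foldl bSubset t).2.2 := by
  induction ss generalizing t with
  | nil => exact ⟨le_refl _, le_refl _, le_refl _⟩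
  | cons s rest ih =>
    have h := ih (bSubset t s)
    simp only [List.foldl_cons]
    refine ⟨le_trans ?_ h.1, le_trans ?_ h.2.1, le_trans ?_ h.2.2⟩ <;>
      · simp only [bSubset]; omega

theorem aLoop_eq (game_id : Int) (ss : List String) (mr mg mb : Int)
    (hr : mr ≤ 12) (hg : mg ≤ 13) (hb : mb ≤ 14) :
    aLoop game_id ss =
      (if (ss.foldl bSubset (mr, mg, mb)).1 ≤ 12 ∧ (ss.foldl bSubset (mr, mg, mb)).2.1 ≤ 13 ∧
          (ss.foldl bSubset (mr, mg, mb)).2.2 ≤ 14 then game_id else 0) := by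
  induction ss generalizing mr mg mb with
  | nil => simp only [aLoop, List.foldl_nil]; rw [if_pos ⟨hr, hg, hb⟩]
  | cons s rest ih =>
    simp only [aLoop, List.foldl_cons]
    have hst : (pySplit s ",").foldl aCube [0, 0, 0] =
        tl3 ((pySplit s ",").foldl bCube (0, 0, 0)) :=
      foldl_cube_eq _ ((0 : Int), (0 : Int), (0 : Int))
    set c := (pySplit s ",").foldl bCube (0, 0, 0) with hc
    by_cases hok : c.1 ≤ 12 ∧ c.2.1 ≤ 13 ∧ c.2.2 ≤ 14
    · rw [if_neg]
      · have heq : bSubset (mr, mg, mb) s = (max mr c.1, max mg c.2.1, max mb c.2.2) := by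
          simp only [bSubset, ← hc]
        simp only [heq]
        exact ih (max mr c.1) (max mg c.2.1) (max mb c.2.2) (by omega) (by omega) (by omega)
      · rw [hst]
        simp only [tl3, check_lists_iff, not_not]
        exact hok
    · rw [if_pos]
      · have heq : bSubset (mr, mg, mb) s = (max mr c.1, max mg c.2.1, max mb c.2.2) := by
          simp only [bSubset, ← hc]
        simp only [heq]
        have hm := bSubset_mono rest (max mr c.1, max mg c.2.1, max mb c.2.2)
        rw [if_neg]
        intro hfin
        simp only at hm
        omega
      · rw [hst]
        simp only [tl3, check_lists_iff]
        exact hok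

-- ===== VERDICT (by name: the statement is the Claim_ definition above) =====
theorem check_possible_game_spec : Claim_equal_check_possible_game := by
  intro game_id content _ _
  show check_possible_game game_id content = check_possible_game_alt game_id content
  unfold check_possible_game check_possible_game_alt
  exact aLoop_eq game_id _ 0 0 0 (by omega) (by omega) (by omega)
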